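-- pv_equiv track=rewrite | github.com/saurabh-gandhi/portfolio-analyser | src/utils.py | best_sector
-- ===== SOURCE A (Python) =====
-- def best_sector(sectors: list) -> str:
--     """Pick the most meaningful sector label from a list (prefer Morningstar-style)."""
--     preferred = [
--         'Financial Services', 'Technology', 'Consumer Cyclical', 'Industrials',
--         'Basic Materials', 'Healthcare', 'Consumer Defensive', 'Energy',
--         'Utilities', 'Communication Services', 'Real Estate', 'Banks',
--     ]
--     clean = [s for s in sectors if s and str(s) not in ('nan', '')]
--     for p in preferred:
--         if p in clean:
--             return p
--     return clean[0] if clean else ''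
-- ===== SOURCE B (Python) =====
-- def best_sector(sectors: list) -> str:
--     """Pick the most meaningful sector label from a list (prefer Morningstar-style)."""
--     preferred = [
--         'Financial Services', 'Technology', 'Consumer Cyclical', 'Industrials',
--         'Basic Materials', 'Healthcare', 'Consumer Defensive', 'Energy',
--         'Utilities', 'Communication Services', 'Real Estate', 'Banks',
--     ]
--     rank = {p: i for i, p in enumerate(preferred)}
--     clean = [s for s in sectors if s and str(s) not in ('nan', '')]
--     best = None
--     for s in clean:
--         r = rank.get(s)
--         if r is not None and (best is None or r < best[1]):
--             best = (s, r)
--     if best is not None: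
--         return best[0]
--     return clean[0] if clean else ''
-- ===== Notes on version B (the rewrite author's own statement) =====
-- stated objective: alternative
-- what changed: Replaces the 12-pass scan over the preferred list (one 'p in clean' membership scan per preferred label) with a rank dictionary built once and a single pass over clean that keeps the element of smallest rank.
import Mathlib
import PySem

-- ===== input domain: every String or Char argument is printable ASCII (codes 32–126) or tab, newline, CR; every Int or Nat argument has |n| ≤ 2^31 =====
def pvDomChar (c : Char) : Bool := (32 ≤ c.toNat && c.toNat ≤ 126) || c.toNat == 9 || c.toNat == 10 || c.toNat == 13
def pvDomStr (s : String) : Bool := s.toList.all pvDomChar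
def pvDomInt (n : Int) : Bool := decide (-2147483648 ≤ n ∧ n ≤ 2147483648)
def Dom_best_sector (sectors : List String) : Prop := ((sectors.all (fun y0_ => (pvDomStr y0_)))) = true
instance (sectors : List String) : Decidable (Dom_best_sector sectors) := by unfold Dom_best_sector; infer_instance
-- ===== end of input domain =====

-- B replaces A's 12 membership scans over clean with a rank dictionary and one min-rank pass over clean; objective: alternative.

-- ===== PORT A =====
def preferredA : List String :=
  ["Financial Services", "Technology", "Consumer Cyclical", "Industrials",
   "Basic Materials", "Healthcare", "Consumer Defensive", "Energy",
   "Utilities", "Communication Services", "Real Estate", "Banks"]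

-- the 'for p in preferred: if p in clean: return p' loop (early return → Option)
def findPref : List String → List String → Option String
  | [], _ => none
  | p :: ps, clean => if p ∈ clean then some p else findPref ps clean

def best_sector (sectors : List String) : String :=
  let clean := sectors.filter (fun s => !(s == "") && !(s == "nan"))
  match findPref preferredA clean with
  | some p => p
  | none => match clean with
    | [] => ""
    | c :: _ => c

-- ===== PORT B =====
def preferredB : List String :=
  ["Financial Services", "Technology", "Consumer Cyclical", "Industrials",
   "Basic Materials", "Healthcare", "Consumer Defensive", "Energy",
   "Utilities", "Communication Services", "Real Estate", "Banks"]

-- rank = {p: i for i, p in enumerate(preferred)}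
def rankB : PySem.Dict String Int :=
  (PySem.List.enumerate preferredB 0).foldl (fun d ip => d.insert ip.2 ip.1) PySem.Dict.empty

-- loop body: keep the clean element of smallest rank seen so far
def stepB (b : Option (String × Int)) (s : String) : Option (String × Int) :=
  match rankB.get? s with
  | none => b
  | some r =>
    match b with
    | none => some (s, r)
    | some (_, br) => if r < br then some (s, r) else b

def best_sector_alt (sectors : List String) : String :=
  let clean := sectors.filter (fun s => !(s == "") && !(s == "nan"))
  match clean.foldl stepB none with
  | some (s, _) => s
  | none => match clean with
    | [] => ""
    | c :: _ => c

-- ===== PRECONDITION & SPEC =====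
def Spec_best_sector (sectors : List String) (out : String) : Prop := out = best_sector_alt sectors
instance (sectors : List String) (out : String) : Decidable (Spec_best_sector sectors out) := by unfold Spec_best_sector; infer_instance

-- ===== CLAIM (what is proved, stated in full; the proofs are below) =====
def Claim_equal_best_sector : Prop := ∀ (sectors : List String), Dom_best_sector sectors → Spec_best_sector sectors (best_sector sectors)

-- rank of a string = its position in a list (my own recursion; bridged to rankB below)
def rk : List String → String → Option Int
  | [], _ => none
  | p :: ps, s => if p = s then some 0 else (rk ps s).map (· + 1)

-- stepB with the dict lookup replaced by rk (generic in the preferred list P)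
def stepR (P : List String) (b : Option (String × Int)) (s : String) : Option (String × Int) :=
  match rk P s with
  | none => b
  | some r =>
    match b with
    | none => some (s, r)
    | some (_, br) => if r < br then some (s, r) else b

-- 'min with left tie-preference' combinator for the fold's accumulator
def mergeB : Option (String × Int) → Option (String × Int) → Option (String × Int)
  | a, none => a
  | none, some b => some b
  | some a, some b => if b.2 < a.2 then some b else some a

-- A's loop result paired with its rank
def pf (P : List String) (cl : List String) : Option (String × Int) :=
  match findPref P cl with
  | none => none
  | some p => (rk P p).map (fun i => (p, i))

theorem get?_mk_enum (P : List String) (k : Int) (s : String) :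
    (PySem.Dict.mk ((PySem.List.enumerate P k).map Prod.swap)).get? s = (rk P s).map (· + k) := by
  induction P generalizing k with
  | nil => simp [PySem.List.enumerate_nil, rk, PySem.Dict.get?]
  | cons p ps ih =>
    simp only [PySem.List.enumerate_cons, List.map_cons, Prod.swap_prod_mk,
      PySem.Dict.get?_mk_cons, rk, beq_iff_eq, ih]
    by_cases h : p = s
    · simp [h]
    · simp only [h, if_false, Option.map_map]
      cases rk ps s <;> simp <;> ring

set_option maxHeartbeats 2000000 in
theorem rankB_eq : rankB = PySem.Dict.mk ((PySem.List.enumerate preferredA 0).map Prod.swap) := by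
  decide

theorem rankB_get_eq_rk (s : String) : rankB.get? s = rk preferredA s := by
  rw [rankB_eq, get?_mk_enum]
  cases rk preferredA s <;> simp

theorem rk_nonneg (P : List String) (s : String) (i : Int) (h : rk P s = some i) : 0 ≤ i := by
  induction P generalizing i with
  | nil => simp [rk] at h
  | cons p ps ih =>
    simp only [rk] at h
    split_ifs at h with hp
    · simp at h; omega
    · cases hr : rk ps s <;> rw [hr] at h <;> simp at h
      have := ih _ hr; omega

theorem rk_none_iff (P : List String) (s : String) : rk P s = none ↔ s ∉ P := by
  induction P with
  | nil => simp [rk]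
  | cons p ps ih =>
    simp only [rk, List.mem_cons]
    by_cases h : p = s
    · simp [h]
    · cases hr : rk ps s <;> simp [h, hr, ← ih] <;> tauto

theorem fp_mem (P cl : List String) (q : String) (h : findPref P cl = some q) : q ∈ P ∧ q ∈ cl := by
  induction P with
  | nil => simp [findPref] at h
  | cons p ps ih =>
    simp only [findPref] at h
    split_ifs at h with hp
    · cases h; exact ⟨by simp, hp⟩
    · rcases ih h with ⟨h1, h2⟩; exact ⟨by simp [h1], h2⟩

theorem fp_nil (P : List String) : findPref P [] = none := by
  induction P with
  | nil => rfl
  | cons p ps ih => simp [findPref, ih]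

theorem crux1 (P : List String) (c : String) (cl : List String) (h : c ∉ P) :
    findPref P (c :: cl) = findPref P cl := by
  induction P with
  | nil => rfl
  | cons p ps ih =>
    simp only [List.mem_cons, not_or] at h
    simp only [findPref, List.mem_cons]
    have : ¬ p = c := fun e => h.1 e.symm
    simp [this, ih h.2]

theorem crux2a (P : List String) (c : String) (i : Int) (cl : List String)
    (hc : rk P c = some i) (hn : findPref P cl = none) : findPref P (c :: cl) = some c := by
  induction P generalizing i with
  | nil => simp [rk] at hc
  | cons p ps ih =>
    simp only [findPref] at hn ⊢
    split_ifs at hn with hp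
    simp only [List.mem_cons]
    by_cases hpc : p = c
    · simp [hpc]
    · simp only [rk, hpc, if_false] at hc
      cases hr : rk ps c <;> rw [hr] at hc <;> simp at hc
      simp [hp, hpc, ih _ hr hn]

theorem crux2b (P : List String) (hnd : P.Nodup) (c q : String) (i j : Int) (cl : List String)
    (hc : rk P c = some i) (hq : findPref P cl = some q) (hj : rk P q = some j) :
    findPref P (c :: cl) = if i ≤ j then some c else some q := by
  induction P generalizing i j with
  | nil => simp [rk] at hc
  | cons p ps ih =>
    rcases List.nodup_cons.mp hnd with ⟨hpps, hnd'⟩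
    simp only [findPref, List.mem_cons] at hq ⊢
    by_cases hpc : p = c
    · subst hpc
      simp [rk] at hc
      have hj0 : 0 ≤ j := rk_nonneg _ _ _ hj
      rw [if_pos (Or.inl rfl), if_pos (by omega)]
    · simp only [rk, hpc, if_false] at hc
      cases hr : rk ps c <;> rw [hr] at hc <;> simp at hc
      rename_i i'
      split_ifs at hq with hpcl
      · cases hq
        simp [rk] at hj
        have h0 := rk_nonneg _ _ _ hr
        rw [if_pos (Or.inr hpcl), if_neg (by omega)]
      · have hqps : q ∈ ps := (fp_mem _ _ _ hq).1
        have hqp : ¬ p = q := fun e => hpps (e ▸ hqps)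
        simp only [rk, hqp, if_false] at hj
        cases hr2 : rk ps q <;> rw [hr2] at hj <;> simp at hj
        rename_i j'
        rw [if_neg (by simp [hpc, hpcl]), ih hnd' _ _ hr hq hr2]
        by_cases hij : i' ≤ j'
        · rw [if_pos hij, if_pos (by omega)]
        · rw [if_neg hij, if_neg (by omega)]

theorem merge_none_left (x : Option (String × Int)) : mergeB none x = x := by
  cases x <;> rfl

theorem step_merge (P : List String) (acc : Option (String × Int)) (c : String) :
    stepR P acc c = mergeB acc (stepR P none c) := by
  cases hrc : rk P c <;> cases acc <;> simp [stepR, mergeB, hrc]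

theorem merge_assoc (a b c : Option (String × Int)) :
    mergeB (mergeB a b) c = mergeB a (mergeB b c) := by
  rcases a with _ | a <;> rcases b with _ | b <;> rcases c with _ | c <;>
    simp only [mergeB] <;> (try split_ifs) <;> simp only [mergeB] <;> (try split_ifs) <;>
    first | rfl | (exfalso; omega)

theorem foldl_merge (P : List String) (cl : List String) :
    ∀ acc, cl.foldl (stepR P) acc = mergeB acc (cl.foldl (stepR P) none) := by
  induction cl with
  | nil => intro acc; rfl
  | cons c cl ih =>
    intro acc
    simp only [List.foldl_cons]
    rw [ih (stepR P acc c), ih (stepR P none c), step_merge, merge_assoc]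

theorem foldM (P : List String) (hnd : P.Nodup) (cl : List String) :
    cl.foldl (stepR P) none = pf P cl := by
  induction cl with
  | nil => simp [pf, fp_nil]
  | cons c cl ih =>
    rw [List.foldl_cons, foldl_merge, ih]
    cases hrc : rk P c with
    | none =>
      have hcP : c ∉ P := (rk_none_iff P c).mp hrc
      have hstep : stepR P none c = none := by simp [stepR, hrc]
      rw [hstep]
      unfold pf
      rw [crux1 P c cl hcP]
      cases findPref P cl <;> simp [merge_none_left]
    | some i =>
      have hstep : stepR P none c = some (c, i) := by simp [stepR, hrc]
      rw [hstep]
      cases hq : findPref P cl with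
      | none =>
        simp only [pf, hq, crux2a P c i cl hrc hq, hrc]
        rfl
      | some q =>
        have hqP : q ∈ P := (fp_mem _ _ _ hq).1
        obtain ⟨j, hj⟩ : ∃ j, rk P q = some j := by
          cases hr2 : rk P q
          · exact absurd ((rk_none_iff P q).mp hr2) (by simp [hqP])
          · exact ⟨_, rfl⟩
        simp only [pf, hq, crux2b P hnd c q i j cl hrc hq hj, hj, Option.map_some]
        by_cases hij : i ≤ j
        · rw [if_pos hij]
          simp only [hrc, Option.map_some, mergeB]
          rw [if_neg (by show ¬(j < i); omega)]
        · rw [if_neg hij]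
          simp only [mergeB]
          rw [if_pos (by show j < i; omega), hj, Option.map_some]

set_option maxHeartbeats 400000 in
theorem preferredA_nodup : preferredA.Nodup := by decide

theorem stepB_eq_stepR : stepB = stepR preferredA := by
  funext b s
  simp [stepB, stepR, rankB_get_eq_rk]

theorem main_cl (cl : List String) :
    (match findPref preferredA cl with
     | some p => p
     | none => match cl with | [] => "" | c :: _ => c)
    = (match cl.foldl stepB none with
       | some (s, _) => s
       | none => match cl with | [] => "" | c :: _ => c) := by
  rw [stepB_eq_stepR, foldM preferredA preferredA_nodup]
  cases hq : findPref preferredA cl with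
  | none => simp [pf, hq]
  | some p =>
    have hpP : p ∈ preferredA := (fp_mem _ _ _ hq).1
    obtain ⟨i, hi⟩ : ∃ i, rk preferredA p = some i := by
      cases hr : rk preferredA p
      · exact absurd ((rk_none_iff _ p).mp hr) (by simp [hpP])
      · exact ⟨_, rfl⟩
    simp [pf, hq, hi]

-- ===== VERDICT (by name: the statement is the Claim_ definition above) =====
theorem best_sector_spec : Claim_equal_best_sector := by
  intro sectors _
  exact main_cl (sectors.filter (fun s => !(s == "") && !(s == "nan")))
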